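-- pv_equiv track=rewrite | github.com/Aizzler6s/crew-allowance-app | parser.py | group_into_days
-- ===== SOURCE A (Python) =====
-- def time_to_minutes(t):
--     h, m = map(int, t.split(":"))
--     return h * 60 + m
--
-- def group_into_days(flights):
--     """
--     New logic:
--     - if gap between flights > 8h → new day
--     - if dep != previous arrival → new duty/day
--     """
--
--     days = []
--     current_day = []
--
--     for i, flight in enumerate(flights):
--
--         if i == 0:
--             current_day.append(flight)
--             continue
--
--         prev = flights[i - 1]
--
--         time_gap = time_to_minutes(flight["time"]) - time_to_minutes(prev["time"])
--
--         # handle midnight wrap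
--         if time_gap < 0:
--             time_gap += 24 * 60
--
--         # RULES 👇
--         if time_gap > 480 or flight["dep"] != prev["arr"]:
--             days.append(current_day)
--             current_day = [flight]
--         else:
--             current_day.append(flight)
--
--     if current_day:
--         days.append(current_day)
--
--     return days
-- ===== SOURCE B (Python) =====
-- def time_to_minutes(t):
--     h, m = map(int, t.split(":"))
--     return h * 60 + m
--
-- def _new_day(prev, cur):
--     time_gap = time_to_minutes(cur["time"]) - time_to_minutes(prev["time"])
--     if time_gap < 0:
--         time_gap += 24 * 60
--     return time_gap > 480 or cur["dep"] != prev["arr"]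
--
-- def group_into_days(flights):
--     days = []
--     n = len(flights)
--     i = 0
--     while i < n:
--         j = i + 1
--         while j < n and not _new_day(flights[j - 1], flights[j]):
--             j += 1
--         days.append(flights[i:j])
--         i = j
--     return days
-- ===== Notes on version B (the rewrite author's own statement) =====
-- stated objective: alternative
-- what changed: Replaces A's element-by-element accumulator fold (days/current_day state, trailing flush) with an index two-pointer scan: an inner while advances j to the end of each day and one slice flights[i:j] emits the whole day at once.
import Mathlib
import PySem

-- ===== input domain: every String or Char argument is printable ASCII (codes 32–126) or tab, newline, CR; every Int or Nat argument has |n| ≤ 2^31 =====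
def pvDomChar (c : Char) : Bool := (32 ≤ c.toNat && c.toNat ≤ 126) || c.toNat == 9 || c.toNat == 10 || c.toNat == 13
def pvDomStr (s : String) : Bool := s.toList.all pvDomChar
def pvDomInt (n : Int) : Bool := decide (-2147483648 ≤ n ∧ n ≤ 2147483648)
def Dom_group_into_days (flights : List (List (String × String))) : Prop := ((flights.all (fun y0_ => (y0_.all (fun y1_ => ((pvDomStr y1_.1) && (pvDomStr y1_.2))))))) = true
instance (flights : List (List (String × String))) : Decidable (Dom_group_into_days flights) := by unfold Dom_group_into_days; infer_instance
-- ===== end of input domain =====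

-- B re-implements the grouping as an index two-pointer scan (inner while finds the end of
-- each day, one slice per day) instead of A's element-by-element accumulator fold; objective:
-- alternative decomposition, same O(n) cost.

-- shared helper: Python time_to_minutes (both Source A and Source B use it verbatim).
-- ValueError cases (not exactly two ':' fields, or a field int() rejects) return a default;
-- Pre_group_into_days excludes them.
def time_to_minutes (t : String) : Int :=
  match PySem.Str.split? t ":" with
  | some [a, b] => (PySem.Int.ofStr? a).getD 0 * 60 + (PySem.Int.ofStr? b).getD 0
  | _ => 0

-- ===== PORT A =====
-- loop body of A's `for i, flight in enumerate(flights)` (state = (days, current_day));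
-- dict lookups flight["time"]/["dep"]/prev["arr"] use a default where Python raises KeyError
-- (excluded by Pre_), flights[i-1] likewise (always in range when reached).
def stepA (flights : List (List (String × String)))
    (st : List (List (List (String × String))) × List (List (String × String)))
    (p : Int × List (String × String)) :
    List (List (List (String × String))) × List (List (String × String)) :=
  let days := st.1
  let current_day := st.2
  let i := p.1
  let flight := p.2
  if i == 0 then (days, current_day ++ [flight])
  else
    let prev := (PySem.List.pyGet? flights (i - 1)).getD []
    let time_gap := time_to_minutes (PySem.Dict.getD (PySem.Dict.mk flight) "time" "")
                  - time_to_minutes (PySem.Dict.getD (PySem.Dict.mk prev) "time" "")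
    let time_gap := if time_gap < 0 then time_gap + 24 * 60 else time_gap
    if time_gap > 480 || (PySem.Dict.getD (PySem.Dict.mk flight) "dep" "" != PySem.Dict.getD (PySem.Dict.mk prev) "arr" "") then
      (days ++ [current_day], [flight])
    else
      (days, current_day ++ [flight])

def group_into_days (flights : List (List (String × String))) : List (List (List (String × String))) :=
  let r := (PySem.List.enumerate flights).foldl (stepA flights) ([], [])
  if r.2 ≠ [] then r.1 ++ [r.2] else r.1

-- ===== PORT B =====
-- Source B's _new_day(prev, cur)
def newDay (prev cur : List (String × String)) : Bool :=
  let time_gap := time_to_minutes (PySem.Dict.getD (PySem.Dict.mk cur) "time" "")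
                - time_to_minutes (PySem.Dict.getD (PySem.Dict.mk prev) "time" "")
  let time_gap := if time_gap < 0 then time_gap + 24 * 60 else time_gap
  time_gap > 480 || (PySem.Dict.getD (PySem.Dict.mk cur) "dep" "" != PySem.Dict.getD (PySem.Dict.mk prev) "arr" "")

-- Source B's inner `while j < n and not _new_day(flights[j-1], flights[j]): j += 1`
def scanB (flights : List (List (String × String))) (j : Nat) : Nat :=
  if j < flights.length
      && !(newDay ((PySem.List.pyGet? flights ((j : Int) - 1)).getD [])
                  ((PySem.List.pyGet? flights (j : Int)).getD [])) then
    scanB flights (j + 1)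
  else j
termination_by flights.length - j
decreasing_by
  rename_i h
  simp only [Bool.and_eq_true, decide_eq_true_eq] at h
  omega

theorem scanB_ge (flights : List (List (String × String))) (j : Nat) : j ≤ scanB flights j := by
  fun_induction scanB flights j with
  | case1 j h ih => omega
  | case2 j h => omega

-- Source B's outer `while i < n: … days.append(flights[i:j]); i = j`
def outerB (flights : List (List (String × String))) (i : Nat)
    (days : List (List (List (String × String)))) : List (List (List (String × String))) :=
  if i < flights.length then
    let j := scanB flights (i + 1)
    outerB flights j (days ++ [PySem.List.slice flights (some (i : Int)) (some (j : Int))])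
  else days
termination_by flights.length - i
decreasing_by
  have := scanB_ge flights (i + 1)
  omega

def group_into_days_alt (flights : List (List (String × String))) : List (List (List (String × String))) :=
  outerB flights 0 []

-- ===== PRECONDITION & SPEC =====
-- Pre_ = exactly the inputs where Python A returns normally: for every consecutive pair both
-- "time" values exist and parse as "h:m" (else KeyError/ValueError), and — unless the wrapped
-- gap exceeds 480, in which case Python's `or` short-circuits — cur has "dep" and prev has "arr".
def timeOf? (f : List (String × String)) : Option Int :=
  match PySem.Dict.get? (PySem.Dict.mk f) "time" with
  | none => none
  | some t =>
    match PySem.Str.split? t ":" with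
    | some [a, b] =>
      match PySem.Int.ofStr? a, PySem.Int.ofStr? b with
      | some h, some m => some (h * 60 + m)
      | _, _ => none
    | _ => none

def pairOK (prev cur : List (String × String)) : Bool :=
  match timeOf? prev, timeOf? cur with
  | some tp, some tc =>
    let gap := tc - tp
    let gap := if gap < 0 then gap + 1440 else gap
    gap > 480 || (PySem.Dict.contains (PySem.Dict.mk cur) "dep" && PySem.Dict.contains (PySem.Dict.mk prev) "arr")
  | _, _ => false

def Pre_group_into_days (flights : List (List (String × String))) : Prop :=
  ((flights.zip flights.tail).all (fun p => pairOK p.1 p.2)) = true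

instance (flights : List (List (String × String))) : Decidable (Pre_group_into_days flights) := by
  unfold Pre_group_into_days; infer_instance

def pvWitness_group_into_days : (List (List (String × String))) :=
  [[("time", "10:00"), ("dep", "AAA"), ("arr", "BBB")],
   [("time", "11:00"), ("dep", "BBB"), ("arr", "CCC")]]

def Spec_group_into_days (flights : List (List (String × String))) (out : List (List (List (String × String)))) : Prop := out = group_into_days_alt flights
instance (flights : List (List (String × String))) (out : List (List (List (String × String)))) : Decidable (Spec_group_into_days flights out) := by unfold Spec_group_into_days; infer_instance

-- ===== CLAIM (what is proved, stated in full; the proofs are below) =====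
def Claim_equal_group_into_days : Prop := ∀ (flights : List (List (String × String))), Dom_group_into_days flights → Pre_group_into_days flights → Spec_group_into_days flights (group_into_days flights)

-- ===== LEMMAS AND PROOFS =====

-- proof-side canonical grouping: run length of the current day, and the grouping G
def runG (prev : List (String × String)) : List (List (String × String)) → Nat
  | [] => 0
  | y :: ys => if newDay prev y then 0 else 1 + runG y ys

def G : List (List (String × String)) → List (List (List (String × String)))
  | [] => []
  | x :: xs => (x :: xs.take (runG x xs)) :: G (xs.drop (runG x xs))
termination_by l => l.length
decreasing_by simp

theorem G_nil : G [] = [] := by rw [G]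

theorem G_cons (x : List (String × String)) (xs : List (List (String × String))) :
    G (x :: xs) = (x :: xs.take (runG x xs)) :: G (xs.drop (runG x xs)) := by rw [G]

-- proof-side reading of A's loop state after the i = 0 step
def loopAB (cur : List (List (String × String))) (prev : List (String × String)) :
    List (List (String × String)) → List (List (List (String × String))) × List (List (String × String))
  | [] => ([], cur)
  | y :: ys =>
    if newDay prev y then
      let r := loopAB [y] y ys
      (cur :: r.1, r.2)
    else loopAB (cur ++ [y]) y ys

theorem runG_le (prev : List (String × String)) (ys : List (List (String × String))) :
    runG prev ys ≤ ys.length := by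
  induction ys generalizing prev with
  | nil => simp [runG]
  | cons y ys ih =>
    simp only [runG, List.length_cons]
    have := ih y
    split <;> omega

theorem stepA_eq (pre ys : List (List (String × String))) (y : List (String × String))
    (days : List (List (List (String × String)))) (cur : List (List (String × String)))
    (h : pre ≠ []) :
    stepA (pre ++ y :: ys) (days, cur) ((pre.length : Int), y)
      = if newDay (pre.getLast h) y then (days ++ [cur], [y]) else (days, cur ++ [y]) := by
  have hlen : 0 < pre.length := List.length_pos_iff.mpr h
  have hne : ((pre.length : Int) == 0) = false := by
    simpa using hlen.ne'
  have hprev : PySem.List.pyGet? (pre ++ y :: ys) ((pre.length : Int) - 1) = some (pre.getLast h) := by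
    have h1 : ((pre.length : Int) - 1) = ((pre.length - 1 : Nat) : Int) := by omega
    rw [h1, PySem.List.pyGet?_natCast]
    rw [List.getElem?_append_left (by omega)]
    rw [List.getElem?_eq_getElem (by omega)]
    simp [List.getLast_eq_getElem]
  simp only [stepA, newDay, hne, Bool.false_eq_true, if_false, hprev, Option.getD_some]
  rfl

theorem foldA (ys : List (List (String × String))) :
    ∀ (pre : List (List (String × String))) (h : pre ≠ [])
      (days : List (List (List (String × String)))) (cur : List (List (String × String))),
    (PySem.List.enumerate ys (pre.length : Int)).foldl (stepA (pre ++ ys)) (days, cur)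
      = (days ++ (loopAB cur (pre.getLast h) ys).1, (loopAB cur (pre.getLast h) ys).2) := by
  induction ys with
  | nil => intro pre h days cur; simp [PySem.List.enumerate_nil, loopAB]
  | cons y ys ih =>
    intro pre h days cur
    rw [PySem.List.enumerate_cons, List.foldl_cons, stepA_eq pre ys y days cur h]
    have hpre' : pre ++ [y] ≠ [] := by simp
    have hcast : (pre.length : Int) + 1 = ((pre ++ [y]).length : Int) := by simp
    have hfl : pre ++ y :: ys = (pre ++ [y]) ++ ys := by simp
    have hlast : (pre ++ [y]).getLast hpre' = y := by simp
    by_cases hb : newDay (pre.getLast h) y = true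
    · rw [if_pos hb, hcast, hfl, ih (pre ++ [y]) hpre' (days ++ [cur]) [y]]
      simp [loopAB, hb, hlast]
    · rw [if_neg hb, hcast, hfl, ih (pre ++ [y]) hpre' days (cur ++ [y])]
      rw [Bool.not_eq_true] at hb
      simp [loopAB, hb, hlast]

theorem loopAB_snd_ne (ys : List (List (String × String))) :
    ∀ cur prev, cur ≠ [] → (loopAB cur prev ys).2 ≠ [] := by
  induction ys with
  | nil => intro cur prev hc; simpa [loopAB] using hc
  | cons y ys ih =>
    intro cur prev hc
    simp only [loopAB]
    split
    · exact ih [y] y (by simp)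
    · exact ih (cur ++ [y]) y (by simp)

theorem loopAB_eq_G (ys : List (List (String × String))) :
    ∀ cur prev, (loopAB cur prev ys).1 ++ [(loopAB cur prev ys).2]
      = (cur ++ ys.take (runG prev ys)) :: G (ys.drop (runG prev ys)) := by
  induction ys with
  | nil => intro cur prev; simp [loopAB, runG, G_nil]
  | cons y ys ih =>
    intro cur prev
    by_cases hb : newDay prev y = true
    · simp only [loopAB, runG, hb, if_true, List.take_zero, List.drop_zero]
      rw [List.cons_append, ih [y] y, G_cons]
      simp
    · rw [Bool.not_eq_true] at hb
      simp only [loopAB, runG, hb, Bool.false_eq_true, if_false]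
      rw [ih (cur ++ [y]) y]
      have h1 : List.take (1 + runG y ys) (y :: ys) = y :: List.take (runG y ys) ys := by
        rw [Nat.add_comm, List.take_succ_cons]
      have h2 : List.drop (1 + runG y ys) (y :: ys) = List.drop (runG y ys) ys := by
        rw [Nat.add_comm, List.drop_succ_cons]
      rw [h1, h2]
      simp

theorem groupA_eq_G (flights : List (List (String × String))) :
    group_into_days flights = G flights := by
  cases flights with
  | nil => simp [group_into_days, PySem.List.enumerate_nil, G_nil]
  | cons x xs =>
    have hstep0 : stepA (x :: xs) (([] : List (List (List (String × String)))), ([] : List (List (String × String)))) ((0 : Int), x) = ([], [x]) := by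
      simp [stepA]
    have hpre : ([x] : List (List (String × String))) ≠ [] := by simp
    unfold group_into_days
    rw [PySem.List.enumerate_cons, List.foldl_cons, hstep0]
    have h1 : (0 : Int) + 1 = (([x] : List (List (String × String))).length : Int) := by simp
    rw [G_cons, h1, show x :: xs = [x] ++ xs from rfl, foldA xs [x] hpre [] [x]]
    have hlast : ([x] : List (List (String × String))).getLast hpre = x := by simp
    rw [hlast]
    have hne := loopAB_snd_ne xs [x] x (by simp)
    simp only [List.nil_append, hne, ne_eq, not_false_eq_true, if_pos]
    rw [loopAB_eq_G xs [x] x]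
    simp

theorem scanB_run (ys : List (List (String × String))) :
    ∀ (pre : List (List (String × String))) (y : List (String × String)),
    scanB (pre ++ y :: ys) (pre.length + 1) = pre.length + 1 + runG y ys := by
  induction ys with
  | nil =>
    intro pre y
    rw [scanB]
    simp [runG]
  | cons z ys ih =>
    intro pre y
    rw [scanB]
    have hlt : pre.length + 1 < (pre ++ y :: z :: ys).length := by simp
    have hy : PySem.List.pyGet? (pre ++ y :: z :: ys) (((pre.length + 1 : Nat) : Int) - 1) = some y := by
      have h1 : (((pre.length + 1 : Nat) : Int) - 1) = ((pre.length : Nat) : Int) := by omega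
      rw [h1]
      exact PySem.List.pyGet?_append_length pre (z :: ys) y
    have hz : PySem.List.pyGet? (pre ++ y :: z :: ys) (((pre.length + 1 : Nat) : Int)) = some z := by
      have h2 : pre ++ y :: z :: ys = (pre ++ [y]) ++ z :: ys := by simp
      have h3 : (((pre.length + 1 : Nat) : Int)) = (((pre ++ [y]).length : Nat) : Int) := by simp
      rw [h2, h3]
      exact PySem.List.pyGet?_append_length (pre ++ [y]) ys z
    rw [hy, hz]
    simp only [Option.getD_some, hlt, decide_true, Bool.true_and]
    by_cases hb : newDay y z = true
    · simp [runG, hb]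
    · rw [Bool.not_eq_true] at hb
      rw [hb]
      simp only [Bool.not_false, if_true]
      have h2 : pre ++ y :: z :: ys = (pre ++ [y]) ++ z :: ys := by simp
      have h3 : pre.length + 1 + 1 = (pre ++ [y]).length + 1 := by simp
      rw [h2, h3, ih (pre ++ [y]) z]
      simp only [runG, hb, Bool.false_eq_true, if_false, List.length_append, List.length_cons,
        List.length_nil]
      omega

theorem outerB_eq_G (n : Nat) :
    ∀ (ys : List (List (String × String))), ys.length ≤ n →
    ∀ (pre : List (List (String × String))) (days : List (List (List (String × String)))),
    outerB (pre ++ ys) pre.length days = days ++ G ys := by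
  induction n with
  | zero =>
    intro ys hys pre days
    have h0 : ys = [] := List.eq_nil_of_length_eq_zero (by omega)
    subst h0
    rw [outerB]
    simp [G_nil]
  | succ n ih =>
    intro ys hys pre days
    cases ys with
    | nil =>
      rw [outerB]
      simp [G_nil]
    | cons y ys' =>
      rw [outerB]
      have hlt : pre.length < (pre ++ y :: ys').length := by simp
      rw [if_pos hlt]
      set k := runG y ys' with hk
      have hkle : k ≤ ys'.length := runG_le y ys'
      have hscan : scanB (pre ++ y :: ys') (pre.length + 1) = pre.length + 1 + k := scanB_run ys' pre y
      have hslice : PySem.List.slice (pre ++ y :: ys') (some ((pre.length : Nat) : Int)) (some (((pre.length + 1 + k : Nat)) : Int))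
          = y :: ys'.take k := by
        rw [PySem.List.slice_natCast, List.drop_left]
        have h4 : (pre.length + 1 + k) - pre.length = k + 1 := by omega
        rw [h4, List.take_succ_cons]
      have hre : pre ++ y :: ys' = (pre ++ y :: ys'.take k) ++ ys'.drop k := by simp
      have hlen2 : (pre ++ y :: ys'.take k).length = pre.length + 1 + k := by
        simp [List.length_take]
        omega
      calc outerB (pre ++ y :: ys') (scanB (pre ++ y :: ys') (pre.length + 1))
              (days ++ [PySem.List.slice (pre ++ y :: ys') (some ((pre.length : Nat) : Int)) (some ((scanB (pre ++ y :: ys') (pre.length + 1) : Nat) : Int))])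
          = outerB ((pre ++ y :: ys'.take k) ++ ys'.drop k) (pre ++ y :: ys'.take k).length (days ++ [y :: ys'.take k]) := by
            rw [hscan, hslice, hlen2]
            rw [← hre]
        _ = (days ++ [y :: ys'.take k]) ++ G (ys'.drop k) := by
            apply ih (ys'.drop k) (by simp at hys ⊢; omega)
        _ = days ++ G (y :: ys') := by
            rw [G_cons, ← hk]
            simp

theorem groupB_eq_G (flights : List (List (String × String))) :
    group_into_days_alt flights = G flights := by
  have h := outerB_eq_G flights.length flights (le_refl _) [] []
  simpa [group_into_days_alt] using h

-- ===== VERDICT (by name: the statement is the Claim_ definition above) =====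
theorem group_into_days_spec : Claim_equal_group_into_days := by
  intro flights _ _
  unfold Spec_group_into_days
  rw [groupA_eq_G, groupB_eq_G]
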